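-- pv_equiv track=rewrite | github.com/NoOneXXX/keepnoteplus | keepnote/gui/richtext/__init__.py | replace_vars
-- ===== SOURCE A (Python) =====
-- def replace_vars(text, values):
--     textlen = len(text)
--     out = []
--     i = 0
--     while i < textlen:
--         if text[i] == "\\" and i < textlen - 1:
--             out.append(text[i+1])
--             i += 2
--         elif text[i] == "%" and i < textlen - 1:
--             varname = text[i:i+2]
--             out.append(values.get(varname, ""))
--             i += 2
--         else:
--             out.append(text[i])
--             i += 1
--     return "".join(out)
-- ===== SOURCE B (Python) =====
-- import re
--
-- _ESCAPE_RE = re.compile(r'\\(.)|(%.)', re.DOTALL)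
--
--
-- def replace_vars(text, values):
--     # One regex pass: backslash escapes emit the escaped char, %X pairs are
--     # looked up (default ""); unmatched trailing '\' or '%' falls through as-is.
--     def repl(m):
--         if m.group(1) is not None:
--             return m.group(1)
--         return values.get(m.group(2), "")
--     return _ESCAPE_RE.sub(repl, text)
-- ===== Notes on version B (the rewrite author's own statement) =====
-- stated objective: idiomatic
-- what changed: Replaced the hand-written index/while loop with list accumulator and join by a single compiled-regex substitution whose callback handles the two escape alternatives.
import Mathlib
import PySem

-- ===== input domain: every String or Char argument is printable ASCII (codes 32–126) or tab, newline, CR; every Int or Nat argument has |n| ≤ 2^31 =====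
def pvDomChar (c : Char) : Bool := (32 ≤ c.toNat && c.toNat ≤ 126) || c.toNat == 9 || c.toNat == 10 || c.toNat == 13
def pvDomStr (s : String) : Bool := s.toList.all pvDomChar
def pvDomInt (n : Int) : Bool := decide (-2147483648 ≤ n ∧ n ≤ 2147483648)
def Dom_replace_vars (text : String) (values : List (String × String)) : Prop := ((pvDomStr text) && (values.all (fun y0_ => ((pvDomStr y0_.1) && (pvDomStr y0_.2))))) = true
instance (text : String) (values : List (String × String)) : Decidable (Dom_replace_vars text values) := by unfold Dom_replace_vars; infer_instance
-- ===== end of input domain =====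

-- B replaces A's index/while loop + list/join with a single regex-substitution pass (idiomatic); same return value everywhere.

-- ===== PORT A =====
-- A's while loop over index i with the `out` list of appended strings, joined at the end.
-- `text[i]` is always in range where read (guarded by i < textlen), so List.getD is exact here.
def replace_varsGo (text : List Char) (values : List (String × String)) (i : Nat)
    (out : List String) : List String :=
  if h : i < text.length then
    if text.getD i ' ' = '\\' ∧ i < text.length - 1 then
      replace_varsGo text values (i + 2) (out ++ [String.ofList [text.getD (i + 1) ' ']])
    else if text.getD i ' ' = '%' ∧ i < text.length - 1 then
      -- varname = text[i:i+2]; values.get(varname, "")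
      replace_varsGo text values (i + 2)
        (out ++ [PySem.Dict.getD (PySem.Dict.mk values)
                  (String.ofList (PySem.List.slice text (some (i : Int)) (some ((i + 2 : Nat) : Int)))) ""])
    else
      replace_varsGo text values (i + 1) (out ++ [String.ofList [text.getD i ' ']])
  else out
termination_by text.length - i
decreasing_by all_goals omega

def replace_vars (text : String) (values : List (String × String)) : String :=
  PySem.Str.join "" (replace_varsGo text.toList values 0 [])

-- ===== PORT B =====
-- B's regex engine scan: at each position try the alternatives `\\(.)` then `(%.)`;
-- on no match the character is emitted unchanged (a trailing '\' or '%' cannot match).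
def pvSub (values : List (String × String)) : List Char → List Char
  | [] => []
  | [c] => [c]
  | c :: d :: rest =>
    if c = '\\' then d :: pvSub values rest
    else if c = '%' then
      (PySem.Dict.getD (PySem.Dict.mk values) (String.ofList [c, d]) "").toList ++ pvSub values rest
    else c :: pvSub values (d :: rest)

def replace_vars_alt (text : String) (values : List (String × String)) : String :=
  String.ofList (pvSub values text.toList)

-- ===== PRECONDITION & SPEC =====
def Spec_replace_vars (text : String) (values : List (String × String)) (out : String) : Prop := out = replace_vars_alt text values
instance (text : String) (values : List (String × String)) (out : String) : Decidable (Spec_replace_vars text values out) := by unfold Spec_replace_vars; infer_instance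

-- ===== CLAIM (what is proved, stated in full; the proofs are below) =====
def Claim_equal_replace_vars : Prop := ∀ (text : String) (values : List (String × String)), Dom_replace_vars text values → Spec_replace_vars text values (replace_vars text values)

-- ===== LEMMAS AND PROOFS =====

-- pvSub always consumes the head character and continues one or two positions later.
lemma pvSub_cons_of_ne (values : List (String × String)) (c : Char) (cs : List Char)
    (h1 : ¬ c = '\\') (h2 : ¬ c = '%') :
    pvSub values (c :: cs) = c :: pvSub values cs := by
  cases cs <;> simp [pvSub, h1, h2]

lemma pvSub_bs (values : List (String × String)) (d : Char) (rest : List Char) :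
    pvSub values ('\\' :: d :: rest) = d :: pvSub values rest := by simp [pvSub]

lemma pvSub_pct (values : List (String × String)) (d : Char) (rest : List Char) :
    pvSub values ('%' :: d :: rest)
      = (PySem.Dict.getD (PySem.Dict.mk values) (String.ofList ['%', d]) "").toList
          ++ pvSub values rest := by simp [pvSub]

lemma go_flatten (text : List Char) (values : List (String × String)) :
    ∀ i out, ((replace_varsGo text values i out).map String.toList).flatten
      = (out.map String.toList).flatten ++ pvSub values (text.drop i) := by
  intro i out
  induction i, out using replace_varsGo.induct text values with
  | case1 i out h hc ih =>
    obtain ⟨hc, hlt⟩ := hc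
    have h1 : i + 1 < text.length := by omega
    rw [List.getD_eq_getElem text ' ' h] at hc
    rw [replace_varsGo, dif_pos h,
        if_pos ⟨by rw [List.getD_eq_getElem text ' ' h]; exact hc, hlt⟩, ih,
        List.getD_eq_getElem text ' ' h1,
        List.drop_eq_getElem_cons h, List.drop_eq_getElem_cons h1, hc, pvSub_bs]
    simp only [List.map_append, List.map_cons, List.map_nil, List.flatten_append,
      List.flatten_cons, List.flatten_nil, String.toList_ofList, List.append_nil,
      List.append_assoc, List.singleton_append]
  | case2 i out h hc1 hc2 ih =>
    obtain ⟨hc2, hlt⟩ := hc2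
    have h1 : i + 1 < text.length := by omega
    rw [List.getD_eq_getElem text ' ' h] at hc2
    have hsl : PySem.List.slice text (some (i : Int)) (some ((i + 2 : Nat) : Int))
        = [text[i], text[i + 1]] := by
      rw [PySem.List.slice_natCast, List.drop_eq_getElem_cons h, List.drop_eq_getElem_cons h1]
      have e2 : i + 2 - i = 2 := by omega
      rw [e2, List.take_succ_cons, List.take_succ_cons, List.take_zero]
    rw [replace_varsGo, dif_pos h, if_neg hc1,
        if_pos ⟨by rw [List.getD_eq_getElem text ' ' h]; exact hc2, hlt⟩, ih, hsl,
        List.drop_eq_getElem_cons h, List.drop_eq_getElem_cons h1, hc2, pvSub_pct]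
    simp only [List.map_append, List.map_cons, List.map_nil, List.flatten_append,
      List.flatten_cons, List.flatten_nil, List.append_nil, List.append_assoc,
      List.singleton_append]
  | case3 i out h hc1 hc2 ih =>
    rw [replace_varsGo, dif_pos h, if_neg hc1, if_neg hc2, ih,
        List.getD_eq_getElem text ' ' h, List.drop_eq_getElem_cons h]
    by_cases hb : text[i] = '\\'
    · -- '\' as the LAST character: the guard i < textlen - 1 failed, A emits it literally
      have hnl : ¬ i < text.length - 1 := fun hl =>
        hc1 ⟨by rw [List.getD_eq_getElem text ' ' h]; exact hb, hl⟩
      have hdrop : text.drop (i + 1) = [] := List.drop_eq_nil_of_le (by omega)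
      rw [hdrop]
      simp [pvSub]
    · by_cases hp : text[i] = '%'
      · have hnl : ¬ i < text.length - 1 := fun hl =>
          hc2 ⟨by rw [List.getD_eq_getElem text ' ' h]; exact hp, hl⟩
        have hdrop : text.drop (i + 1) = [] := List.drop_eq_nil_of_le (by omega)
        rw [hdrop]
        simp [pvSub]
      · rw [pvSub_cons_of_ne values _ _ hb hp]
        simp
  | case4 i out h =>
    have hdrop : text.drop i = [] := List.drop_eq_nil_of_le (by omega)
    rw [replace_varsGo, dif_neg h, hdrop]
    simp [pvSub]

theorem replace_vars_spec : Claim_equal_replace_vars := by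
  intro text values _
  unfold Spec_replace_vars replace_vars replace_vars_alt
  have h := go_flatten text.toList values 0 []
  simp only [List.drop_zero, List.map_nil, List.flatten_nil, List.nil_append] at h
  have hj : (PySem.Str.join "" (replace_varsGo text.toList values 0 [])).toList
      = ((replace_varsGo text.toList values 0 []).map String.toList).flatten := by
    simp [PySem.Str.join, PySem.Chars.join, List.intercalate]
    generalize (replace_varsGo text.toList values 0 []).map String.toList = parts
    induction parts with
    | nil => simp
    | cons p ps ihp => cases ps <;> simp_all [List.intersperse]
  conv_lhs => rw [← String.ofList_toList (s := PySem.Str.join "" (replace_varsGo text.toList values 0 []))]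
  rw [hj, h]
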